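-- pv_equiv track=rewrite | github.com/SeppoPakonen/Maestro | tools/test_audit/audit_cli_surface_against_allowed_commands.py | categorize_commands
-- ===== SOURCE A (Python) =====
-- from typing import Set, Dict, List, Tuple
--
-- def normalize_command_pattern(command: str) -> str:
--     """
--     Normalize command to a comparable pattern.
--     Extracts the first 2-3 tokens (maestro + command + optional subcommand).
--     """
--     tokens = command.split()
--     if len(tokens) >= 3:
--         return ' '.join(tokens[:3])
--     elif len(tokens) >= 2:
--         return ' '.join(tokens[:2])
--     return command
--
-- def categorize_commands(
--     code_commands: Set[str],
--     allowed_commands: Set[str]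
-- ) -> Tuple[List[str], List[str], List[str]]:
--     """
--     Categorize commands into three groups:
--     1. In both code and runbooks (✅)
--     2. In code but NOT in runbooks (⚠️)
--     3. In runbooks but NOT in code (❌)
--     """
--     # Normalize both sets for comparison
--     code_patterns = {normalize_command_pattern(cmd) for cmd in code_commands}
--     allowed_patterns = {normalize_command_pattern(cmd) for cmd in allowed_commands}
--
--     in_both = sorted(code_patterns & allowed_patterns)
--     in_code_only = sorted(code_patterns - allowed_patterns)
--     in_runbooks_only = sorted(allowed_patterns - code_patterns)
--
--     return in_both, in_code_only, in_runbooks_only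
-- ===== SOURCE B (Python) =====
-- def normalize_command_pattern(command: str) -> str:
--     tokens = command.split()
--     if len(tokens) >= 3:
--         return ' '.join(tokens[:3])
--     elif len(tokens) >= 2:
--         return ' '.join(tokens[:2])
--     return command
--
--
-- def categorize_commands(code_commands, allowed_commands):
--     # Sort the two deduplicated pattern lists once, then classify them with a
--     # single two-pointer merge instead of three set-algebra operations.
--     cp = sorted({normalize_command_pattern(c) for c in code_commands})
--     ap = sorted({normalize_command_pattern(c) for c in allowed_commands})
--     in_both, in_code_only, in_runbooks_only = [], [], []
--     i = j = 0
--     while i < len(cp) and j < len(ap):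
--         if cp[i] == ap[j]:
--             in_both.append(cp[i])
--             i += 1
--             j += 1
--         elif cp[i] < ap[j]:
--             in_code_only.append(cp[i])
--             i += 1
--         else:
--             in_runbooks_only.append(ap[j])
--             j += 1
--     in_code_only.extend(cp[i:])
--     in_runbooks_only.extend(ap[j:])
--     return in_both, in_code_only, in_runbooks_only
-- ===== Notes on version B (the rewrite author's own statement) =====
-- stated objective: alternative
-- what changed: Instead of three set-algebra operations (&, -, -) each followed by its own sort, B sorts the two deduplicated pattern lists once and classifies every pattern in a single two-pointer merge that emits the three already-sorted output lists.
import Mathlib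
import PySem

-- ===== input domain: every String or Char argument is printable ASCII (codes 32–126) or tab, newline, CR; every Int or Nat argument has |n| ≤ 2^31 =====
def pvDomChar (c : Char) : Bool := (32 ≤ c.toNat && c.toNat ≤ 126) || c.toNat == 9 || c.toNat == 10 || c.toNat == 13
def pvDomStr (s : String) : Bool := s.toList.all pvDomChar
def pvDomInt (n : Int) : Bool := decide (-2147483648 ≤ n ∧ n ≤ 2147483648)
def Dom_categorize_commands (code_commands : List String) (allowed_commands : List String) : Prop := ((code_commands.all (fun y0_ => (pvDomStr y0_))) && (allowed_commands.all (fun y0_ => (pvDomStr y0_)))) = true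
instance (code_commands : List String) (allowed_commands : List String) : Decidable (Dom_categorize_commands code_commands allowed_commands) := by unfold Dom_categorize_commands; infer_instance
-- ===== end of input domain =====

-- B replaces A's three set-algebra-then-sort operations by sorting the two deduplicated
-- pattern lists once and classifying them in a single two-pointer merge (objective: alternative).

-- ===== PORT A =====
def normalize_command_pattern (command : String) : String :=
  let tokens := PySem.Str.split₀ command
  if tokens.length ≥ 3 then PySem.Str.join " " (PySem.List.slice tokens none (some 3))
  else if tokens.length ≥ 2 then PySem.Str.join " " (PySem.List.slice tokens none (some 2))
  else command

def categorize_commands (code_commands : List String) (allowed_commands : List String) : List String × List String × List String :=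
  let code_patterns : PySem.Set String := PySem.Set.ofList (code_commands.map normalize_command_pattern)
  let allowed_patterns : PySem.Set String := PySem.Set.ofList (allowed_commands.map normalize_command_pattern)
  let in_both := PySem.List.sorted (PySem.Set.inter code_patterns allowed_patterns) (fun x => x) false
  let in_code_only := PySem.List.sorted (PySem.Set.diff code_patterns allowed_patterns) (fun x => x) false
  let in_runbooks_only := PySem.List.sorted (PySem.Set.diff allowed_patterns code_patterns) (fun x => x) false
  (in_both, in_code_only, in_runbooks_only)

-- ===== PORT B =====
-- the while-loop of Source B (two pointers i, j), as structural recursion on the two sorted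
-- lists; the trailing extend(cp[i:]) / extend(ap[j:]) are the two base cases
def mergeClassify : List String → List String → List String × List String × List String
  | [], bs => ([], [], bs)
  | a :: as, [] => ([], a :: as, [])
  | a :: as, b :: bs =>
    if a = b then
      let r := mergeClassify as bs
      (a :: r.1, r.2.1, r.2.2)
    else if a < b then
      let r := mergeClassify as (b :: bs)
      (r.1, a :: r.2.1, r.2.2)
    else
      let r := mergeClassify (a :: as) bs
      (r.1, r.2.1, b :: r.2.2)
  termination_by as bs => as.length + bs.length

def categorize_commands_alt (code_commands : List String) (allowed_commands : List String) : List String × List String × List String :=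
  let cp := PySem.List.sorted (PySem.Set.ofList (code_commands.map normalize_command_pattern)) (fun x => x) false
  let ap := PySem.List.sorted (PySem.Set.ofList (allowed_commands.map normalize_command_pattern)) (fun x => x) false
  mergeClassify cp ap

-- ===== PRECONDITION & SPEC =====
def Spec_categorize_commands (code_commands : List String) (allowed_commands : List String) (out : List String × List String × List String) : Prop := out = categorize_commands_alt code_commands allowed_commands
instance (code_commands : List String) (allowed_commands : List String) (out : List String × List String × List String) : Decidable (Spec_categorize_commands code_commands allowed_commands out) := by unfold Spec_categorize_commands; infer_instance

-- ===== CLAIM (what is proved, stated in full; the proofs are below) =====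
def Claim_equal_categorize_commands : Prop := ∀ (code_commands : List String) (allowed_commands : List String), Dom_categorize_commands code_commands allowed_commands → Spec_categorize_commands code_commands allowed_commands (categorize_commands code_commands allowed_commands)

-- ===== LEMMAS AND PROOFS =====

-- on strictly increasing inputs the merge computes the three membership filters
lemma mergeClassify_eq (as bs : List String) (ha : as.Pairwise (· < ·)) (hb : bs.Pairwise (· < ·)) :
    mergeClassify as bs = (as.filter (fun a => decide (a ∈ bs)),
                           as.filter (fun a => decide (a ∉ bs)),
                           bs.filter (fun b => decide (b ∉ as))) := by
  fun_induction mergeClassify as bs with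
  | case1 bs => simp
  | case2 a as => simp
  | case3 t1 x t2 r ih =>
    rw [List.pairwise_cons] at ha hb
    have hr : r = (t1.filter (fun a => decide (a ∈ t2)), t1.filter (fun a => decide (a ∉ t2)), t2.filter (fun b => decide (b ∉ t1))) := ih ha.2 hb.2
    rw [hr]
    refine Prod.ext ?_ (Prod.ext ?_ ?_) <;> simp only
    · rw [List.filter_cons_of_pos (by simp)]
      congr 1
      refine List.filter_congr (fun y hy => ?_)
      have hne : y ≠ x := ne_of_gt (ha.1 y hy)
      simp [List.mem_cons, hne]
    · rw [List.filter_cons_of_neg (by simp)]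
      refine List.filter_congr (fun y hy => ?_)
      have hne : y ≠ x := ne_of_gt (ha.1 y hy)
      simp [List.mem_cons, hne]
    · rw [List.filter_cons_of_neg (by simp)]
      refine List.filter_congr (fun y hy => ?_)
      have hne : y ≠ x := ne_of_gt (hb.1 y hy)
      simp [List.mem_cons, hne]
  | case4 a as b bs hne hlt r ih =>
    rw [List.pairwise_cons] at ha
    have hr : r = (as.filter (fun x => decide (x ∈ b :: bs)), as.filter (fun x => decide (x ∉ b :: bs)), (b :: bs).filter (fun x => decide (x ∉ as))) := ih ha.2 hb
    rw [hr]
    have hanb : a ∉ b :: bs := by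
      intro h
      rcases List.mem_cons.mp h with h | h
      · exact hne h
      · rcases List.pairwise_cons.mp hb with ⟨h1, _⟩
        exact absurd hlt (not_lt.mpr (le_of_lt (h1 a h)))
    refine Prod.ext ?_ (Prod.ext ?_ ?_) <;> simp only
    · rw [List.filter_cons_of_neg (by simpa using hanb)]
    · rw [List.filter_cons_of_pos (by simpa using hanb)]
    · refine List.filter_congr (fun x hx => ?_)
      have hbx : b ≤ x := by
        rcases List.mem_cons.mp hx with h | h
        · exact le_of_eq h.symm
        · exact le_of_lt ((List.pairwise_cons.mp hb).1 x h)
      have : x ≠ a := fun h => absurd hlt (not_lt.mpr (h ▸ hbx))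
      simp [List.mem_cons, this]
  | case5 a as b bs hne hnlt r ih =>
    rw [List.pairwise_cons] at hb
    have hr : r = ((a :: as).filter (fun x => decide (x ∈ bs)), (a :: as).filter (fun x => decide (x ∉ bs)), bs.filter (fun x => decide (x ∉ a :: as))) := ih ha hb.2
    rw [hr]
    have hblt : b < a := lt_of_le_of_ne (not_lt.mp hnlt) (fun h => hne h.symm)
    have hbna : b ∉ a :: as := by
      intro h
      rcases List.mem_cons.mp h with h | h
      · exact hne h.symm
      · exact absurd hblt (not_lt.mpr (le_of_lt ((List.pairwise_cons.mp ha).1 b h)))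
    refine Prod.ext ?_ (Prod.ext ?_ ?_) <;> simp only
    · refine (List.filter_congr (fun x hx => ?_)).symm
      have hax : a ≤ x := by
        rcases List.mem_cons.mp hx with h | h
        · exact le_of_eq h.symm
        · exact le_of_lt ((List.pairwise_cons.mp ha).1 x h)
      have : x ≠ b := fun h => absurd hblt (not_lt.mpr (h ▸ hax))
      simp [List.mem_cons, this]
    · refine (List.filter_congr (fun x hx => ?_)).symm
      have hax : a ≤ x := by
        rcases List.mem_cons.mp hx with h | h
        · exact le_of_eq h.symm
        · exact le_of_lt ((List.pairwise_cons.mp ha).1 x h)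
      have : x ≠ b := fun h => absurd hblt (not_lt.mpr (h ▸ hax))
      simp [List.mem_cons, this]
    · rw [List.filter_cons_of_pos (by simpa using hbna)]

-- A's sorted(set-op) equals a membership filter of the sorted deduplicated list,
-- for any set-op t characterised by membership (inter / diff below)
lemma sorted_filter_eq (xs : List String) (p : String → Bool) (t : PySem.Set String)
    (hnd : t.Nodup) (hm : ∀ x, x ∈ t ↔ x ∈ PySem.Set.ofList xs ∧ p x = true) :
    (PySem.List.sorted (PySem.Set.ofList xs) (fun x => x) false).filter p
      = PySem.List.sorted t (fun x => x) false := by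
  refine (PySem.List.sorted_eq_of_perm_of_pairwise_lt _ _ _ ?_ ?_).symm
  · refine (List.perm_ext_iff_of_nodup ?_ hnd).mpr (fun x => ?_)
    · exact List.Nodup.filter p
        ((PySem.List.sorted_ofList_pairwise_lt (xs := xs)).imp (fun h => ne_of_lt h))
    · rw [List.mem_filter, PySem.List.mem_sorted, hm x]
  · exact List.Pairwise.filter p (PySem.List.sorted_ofList_pairwise_lt (xs := xs))

lemma categorize_commands_eq_alt (code_commands allowed_commands : List String) :
    categorize_commands code_commands allowed_commands = categorize_commands_alt code_commands allowed_commands := by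
  unfold categorize_commands categorize_commands_alt
  simp only []
  rw [mergeClassify_eq _ _ (PySem.List.sorted_ofList_pairwise_lt _) (PySem.List.sorted_ofList_pairwise_lt _)]
  refine Prod.ext ?_ (Prod.ext ?_ ?_) <;> simp only
  · refine ((sorted_filter_eq _ _ _ ?_ ?_)).symm
    · exact PySem.Set.nodup_inter _ _ (PySem.Set.nodup_ofList _)
    · intro x
      rw [PySem.Set.mem_inter]
      simp [PySem.List.mem_sorted, PySem.Set.mem_ofList]
  · refine ((sorted_filter_eq _ _ _ ?_ ?_)).symm
    · exact PySem.Set.nodup_diff _ _ (PySem.Set.nodup_ofList _)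
    · intro x
      rw [PySem.Set.mem_diff]
      simp [PySem.List.mem_sorted, PySem.Set.mem_ofList]
  · refine ((sorted_filter_eq _ _ _ ?_ ?_)).symm
    · exact PySem.Set.nodup_diff _ _ (PySem.Set.nodup_ofList _)
    · intro x
      rw [PySem.Set.mem_diff]
      simp [PySem.List.mem_sorted, PySem.Set.mem_ofList]

-- ===== VERDICT (by name: the statement is the Claim_ definition above) =====
theorem categorize_commands_spec : Claim_equal_categorize_commands :=
  fun code_commands allowed_commands _ => categorize_commands_eq_alt code_commands allowed_commands
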